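-- pv_equiv track=rewrite | github.com/ariecattan/multi_mds | utils.py | checkPairContained
-- ===== SOURCE A (Python) =====
-- def checkPairContained(containedCandidateOffset_list, containOffset_list):
--     containedList = []
--     for containedCandidate in containedCandidateOffset_list:
--         contained = False
--         for offset in containOffset_list:
--             contained_start, contained_end = containedCandidate
--             start, end = offset
--             if contained_start >= start and contained_end <= end:
--                 contained = True
--         containedList.append(contained)
--
--     notContained = not(all(containedList))  #if all spans are contained
--     return notContained
-- ===== SOURCE B (Python) =====
-- def checkPairContained(containedCandidateOffset_list, containOffset_list):
--     cands = sorted(containedCandidateOffset_list, key=lambda p: p[0])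
--     offs = sorted(containOffset_list, key=lambda p: p[0])
--     best = None
--     i = 0
--     for s, e in cands:
--         while i < len(offs) and offs[i][0] <= s:
--             b = offs[i][1]
--             if best is None or b > best:
--                 best = b
--             i += 1
--         if best is None or e > best:
--             return True
--     return False
-- ===== Notes on version B (the rewrite author's own statement) =====
-- stated objective: faster
-- what changed: Replaced the nested scan of all offsets per candidate by sort-both-lists-by-start plus a single two-pointer sweep that maintains the running maximum end of the offsets whose start is below the current candidate's start.
import Mathlib
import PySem

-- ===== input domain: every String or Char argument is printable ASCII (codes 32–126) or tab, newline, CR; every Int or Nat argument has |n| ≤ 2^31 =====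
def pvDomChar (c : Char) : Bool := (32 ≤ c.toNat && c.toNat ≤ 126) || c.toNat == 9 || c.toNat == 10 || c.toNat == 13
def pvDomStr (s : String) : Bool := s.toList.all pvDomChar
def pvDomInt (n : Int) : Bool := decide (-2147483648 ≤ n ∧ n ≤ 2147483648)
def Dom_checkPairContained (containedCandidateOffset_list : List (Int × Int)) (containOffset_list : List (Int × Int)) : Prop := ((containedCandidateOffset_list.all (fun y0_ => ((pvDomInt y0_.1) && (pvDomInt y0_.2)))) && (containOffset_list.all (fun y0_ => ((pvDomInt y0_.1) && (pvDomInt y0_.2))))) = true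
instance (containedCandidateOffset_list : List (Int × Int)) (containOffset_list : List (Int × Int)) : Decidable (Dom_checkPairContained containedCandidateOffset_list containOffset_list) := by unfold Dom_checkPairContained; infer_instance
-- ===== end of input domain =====

-- B replaces A's nested scan of all offsets per candidate by sorting both lists by
-- start and one two-pointer sweep with a running maximum offset end (objective: faster).

-- ===== PORT A =====
def checkPairContained (containedCandidateOffset_list : List (Int × Int)) (containOffset_list : List (Int × Int)) : Bool :=
  let containedList := containedCandidateOffset_list.foldl (fun acc containedCandidate =>
    let contained := containOffset_list.foldl (fun contained offset =>
      if containedCandidate.1 ≥ offset.1 ∧ containedCandidate.2 ≤ offset.2 then true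
      else contained) false
    acc ++ [contained]) ([] : List Bool)
  !(containedList.all (fun x => x))

-- ===== PORT B =====
-- the inner while-loop of Source B: consume offsets with start ≤ s, updating the running max end
def pvConsume (s : Int) : List (Int × Int) → Option Int → List (Int × Int) × Option Int
  | [], best => ([], best)
  | q :: rest, best =>
      if q.1 ≤ s then
        pvConsume s rest (some (match best with | none => q.2 | some m => if m < q.2 then q.2 else m))
      else (q :: rest, best)

-- the for-loop of Source B over the sorted candidates ('best is None or e > best' → early True)
def pvSweep : List (Int × Int) → List (Int × Int) → Option Int → Bool
  | [], _, _ => false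
  | p :: cs, offs, best =>
      let r := pvConsume p.1 offs best
      if (match r.2 with | none => true | some m => decide (m < p.2)) then true
      else pvSweep cs r.1 r.2

def checkPairContained_alt (containedCandidateOffset_list : List (Int × Int)) (containOffset_list : List (Int × Int)) : Bool :=
  pvSweep (PySem.List.sorted containedCandidateOffset_list (fun p => p.1) false)
          (PySem.List.sorted containOffset_list (fun p => p.1) false)
          none

-- ===== PRECONDITION & SPEC =====
def Spec_checkPairContained (containedCandidateOffset_list : List (Int × Int)) (containOffset_list : List (Int × Int)) (out : Bool) : Prop := out = checkPairContained_alt containedCandidateOffset_list containOffset_list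
instance (containedCandidateOffset_list : List (Int × Int)) (containOffset_list : List (Int × Int)) (out : Bool) : Decidable (Spec_checkPairContained containedCandidateOffset_list containOffset_list out) := by unfold Spec_checkPairContained; infer_instance

-- ===== CLAIM (what is proved, stated in full; the proofs are below) =====
def Claim_equal_checkPairContained : Prop := ∀ (containedCandidateOffset_list : List (Int × Int)) (containOffset_list : List (Int × Int)), Dom_checkPairContained containedCandidateOffset_list containOffset_list → Spec_checkPairContained containedCandidateOffset_list containOffset_list (checkPairContained containedCandidateOffset_list containOffset_list)

-- ===== LEMMAS AND PROOFS =====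

-- containment query: is (s,e) inside some interval of c?
def pvQ (c : List (Int × Int)) (s e : Int) : Bool := c.any (fun q => decide (q.1 ≤ s ∧ e ≤ q.2))

-- "candidate end e fits under the running max best"
def pvP (best : Option Int) (e : Int) : Bool := match best with | none => false | some m => decide (e ≤ m)

def pvMaxe (best : Option Int) (b : Int) : Option Int :=
  some (match best with | none => b | some m => if m < b then b else m)

theorem pvA_inner (c : List (Int × Int)) (s e : Int) (b : Bool) :
    c.foldl (fun contained q => if s ≥ q.1 ∧ e ≤ q.2 then true else contained) b
      = (b || pvQ c s e) := by
  induction c generalizing b with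
  | nil => simp [pvQ]
  | cons q t ih =>
      simp only [List.foldl_cons, pvQ, List.any_cons, ih]
      by_cases h : s ≥ q.1 ∧ e ≤ q.2
      · have h' : q.1 ≤ s ∧ e ≤ q.2 := by rw [ge_iff_le] at h; exact h
        simp [h, h', pvQ]
      · have h' : ¬ (q.1 ≤ s ∧ e ≤ q.2) := by rw [ge_iff_le] at h; exact h
        simp [h, h', pvQ]

theorem pvA_outer (l c : List (Int × Int)) (acc : List Bool) :
    l.foldl (fun acc p =>
      acc ++ [c.foldl (fun contained q => if p.1 ≥ q.1 ∧ p.2 ≤ q.2 then true else contained) false]) acc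
      = acc ++ l.map (fun p => pvQ c p.1 p.2) := by
  induction l generalizing acc with
  | nil => simp
  | cons p t ih =>
      rw [List.foldl_cons, ih, pvA_inner]
      simp

theorem pvAll_congr {α : Type} (l : List α) (f g : α → Bool)
    (h : ∀ x ∈ l, f x = g x) : l.all f = l.all g := by
  induction l with
  | nil => rfl
  | cons a t ih =>
      simp only [List.all_cons, h a (List.mem_cons_self), ih (fun x hx => h x (List.mem_cons_of_mem a hx))]

theorem pvA_char (l c : List (Int × Int)) :
    checkPairContained l c = !(l.all (fun p => pvQ c p.1 p.2)) := by
  unfold checkPairContained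
  rw [pvA_outer]
  simp only [List.nil_append, List.all_map]
  rfl

theorem pvConsume_spec (s : Int) (offs : List (Int × Int)) (best : Option Int) :
    pvConsume s offs best
      = (offs.dropWhile (fun q => decide (q.1 ≤ s)),
         (offs.takeWhile (fun q => decide (q.1 ≤ s))).foldl (fun b q => pvMaxe b q.2) best) := by
  induction offs generalizing best with
  | nil => simp [pvConsume]
  | cons q t ih =>
      by_cases h : q.1 ≤ s
      · simp [pvConsume, h, ih, pvMaxe]
      · simp [pvConsume, h]

theorem pvP_maxe (b : Option Int) (x e : Int) :
    pvP (pvMaxe b x) e = (pvP b e || decide (e ≤ x)) := by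
  cases b with
  | none => simp [pvMaxe, pvP]
  | some m =>
      simp only [pvMaxe, pvP]
      split_ifs with h <;> rw [Bool.eq_iff_iff] <;> simp <;> omega

theorem pvP_foldl (L : List (Int × Int)) (b : Option Int) (e : Int) :
    pvP (L.foldl (fun b q => pvMaxe b q.2) b) e
      = (pvP b e || L.any (fun q => decide (e ≤ q.2))) := by
  induction L generalizing b with
  | nil => simp
  | cons q t ih => simp [List.foldl_cons, List.any_cons, ih, pvP_maxe, Bool.or_assoc]

theorem pvDropWhile_gt (s : Int) (offs : List (Int × Int))
    (hp : offs.Pairwise (fun a b => a.1 ≤ b.1)) :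
    ∀ q ∈ offs.dropWhile (fun q => decide (q.1 ≤ s)), s < q.1 := by
  induction offs with
  | nil => simp
  | cons a t ih =>
      rw [List.pairwise_cons] at hp
      by_cases h : a.1 ≤ s
      · simpa [List.dropWhile_cons, h] using ih hp.2
      · intro q hq
        rw [List.dropWhile_cons] at hq
        simp only [h, decide_false] at hq
        rw [if_neg (by simp)] at hq
        rcases List.mem_cons.mp hq with rfl | hq
        · omega
        · have := hp.1 q hq; omega

theorem pvNotP_match (best : Option Int) (e : Int) :
    (match best with | none => true | some m => decide (m < e)) = !pvP best e := by
  cases best with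
  | none => rfl
  | some m =>
      show decide (m < e) = !decide (e ≤ m)
      rw [← decide_not, decide_eq_decide]
      omega

theorem pvQ_append (a b : List (Int × Int)) (s e : Int) :
    pvQ (a ++ b) s e = (pvQ a s e || pvQ b s e) := by
  simp [pvQ]

theorem pvSweep_correct : ∀ (cs offs pre : List (Int × Int)),
    cs.Pairwise (fun a b => a.1 ≤ b.1) →
    offs.Pairwise (fun a b => a.1 ≤ b.1) →
    (∀ q ∈ pre, ∀ p ∈ cs, q.1 ≤ p.1) →
    pvSweep cs offs (pre.foldl (fun b q => pvMaxe b q.2) none)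
      = !(cs.all (fun p => pvQ (pre ++ offs) p.1 p.2)) := by
  intro cs
  induction cs with
  | nil => intro offs pre _ _ _; simp [pvSweep]
  | cons p cs ih =>
      intro offs pre hcs hoffs hpre
      rw [List.pairwise_cons] at hcs
      set T := offs.takeWhile (fun q => decide (q.1 ≤ p.1)) with hT
      set D := offs.dropWhile (fun q => decide (q.1 ≤ p.1)) with hD
      have hTD : T ++ D = offs := List.takeWhile_append_dropWhile
      have hbest : pvConsume p.1 offs (pre.foldl (fun b q => pvMaxe b q.2) none)
          = (D, ((pre ++ T).foldl (fun b q => pvMaxe b q.2) none)) := by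
        rw [pvConsume_spec, List.foldl_append]
      have hTle : ∀ q ∈ T, q.1 ≤ p.1 := by
        intro q hq
        have := List.mem_takeWhile_imp (hT ▸ hq)
        simpa using this
      have hDgt : ∀ q ∈ D, p.1 < q.1 := pvDropWhile_gt p.1 offs hoffs
      have hpreT : ∀ q ∈ pre ++ T, q.1 ≤ p.1 := by
        intro q hq
        rcases List.mem_append.mp hq with h | h
        · exact hpre q h p List.mem_cons_self
        · exact hTle q h
      have hQ : pvQ (pre ++ offs) p.1 p.2
          = pvP ((pre ++ T).foldl (fun b q => pvMaxe b q.2) none) p.2 := by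
        rw [pvP_foldl]
        simp only [pvP, Bool.false_or]
        rw [← hTD, ← List.append_assoc, pvQ_append]
        have hDfalse : pvQ D p.1 p.2 = false := by
          simp only [pvQ, List.any_eq_false, decide_eq_true_eq, not_and]
          intro q hq h
          have := hDgt q hq; omega
        rw [hDfalse, Bool.or_false, Bool.eq_iff_iff]
        simp only [pvQ, List.any_eq_true, decide_eq_true_eq]
        constructor
        · rintro ⟨q, hq, _, h2⟩; exact ⟨q, hq, h2⟩
        · rintro ⟨q, hq, h2⟩; exact ⟨q, hq, hpreT q hq, h2⟩
      show (if (match (pvConsume p.1 offs (pre.foldl (fun b q => pvMaxe b q.2) none)).2 with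
              | none => true | some m => decide (m < p.2)) then true
            else pvSweep cs (pvConsume p.1 offs (pre.foldl (fun b q => pvMaxe b q.2) none)).1
                   (pvConsume p.1 offs (pre.foldl (fun b q => pvMaxe b q.2) none)).2)
          = !((p :: cs).all (fun p => pvQ (pre ++ offs) p.1 p.2))
      rw [hbest]
      simp only [pvNotP_match, List.all_cons, ← hQ]
      by_cases hc : pvQ (pre ++ offs) p.1 p.2 = true
      · have hrec : pvSweep cs D ((pre ++ T).foldl (fun b q => pvMaxe b q.2) none)
            = !(cs.all (fun p' => pvQ ((pre ++ T) ++ D) p'.1 p'.2)) := by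
          apply ih D (pre ++ T) hcs.2
          · exact List.Pairwise.sublist (List.dropWhile_sublist _) hoffs
          · intro q hq p' hp'
            exact le_trans (hpreT q hq) (hcs.1 p' hp')
        rw [hc]
        simp only [Bool.not_true, Bool.false_eq_true, if_false, Bool.true_and]
        rw [hrec, List.append_assoc, hTD]
      · have hc' : pvQ (pre ++ offs) p.1 p.2 = false := by simpa using hc
        simp [hc']

-- ===== VERDICT (by name: the statement is the Claim_ definition above) =====
theorem checkPairContained_spec : Claim_equal_checkPairContained := by
  intro l c _
  show checkPairContained l c = checkPairContained_alt l c
  rw [pvA_char, checkPairContained_alt]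
  have h := pvSweep_correct (PySem.List.sorted l (fun p => p.1) false)
      (PySem.List.sorted c (fun p => p.1) false) []
      (PySem.List.sorted_pairwise l (fun p => p.1))
      (PySem.List.sorted_pairwise c (fun p => p.1)) (by simp)
  simp only [List.foldl_nil, List.nil_append] at h
  rw [h]
  congr 1
  have hpl := PySem.List.sorted_perm l (fun p => p.1) false
  have hpc := PySem.List.sorted_perm c (fun p => p.1) false
  rw [hpl.all_eq]
  apply pvAll_congr
  intro p _
  simp only [pvQ]
  exact hpc.any_eq.symm
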